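-- pv_equiv track=rewrite | github.com/google/makani | gs/monitor2/apps/plugins/layouts/network_layout.py | _IsWingNetwork
-- ===== SOURCE A (Python) =====
-- def _IsWingNetwork(link, wing):
--   is_wing = None
--   for port in link:
--     if port.startswith('switches.cs_'):
--       is_port_on_wing = (not port.startswith('switches.cs_gs_'))
--       if is_wing is None:
--         is_wing = is_port_on_wing
--       elif is_wing != is_port_on_wing:
--         return False
--
--   if is_wing is None:
--     is_wing = 'servo' in link[0] and 'servo' in link[1]
--
--   return is_wing if wing else not is_wing
-- ===== SOURCE B (Python) =====
-- def _IsWingNetwork(link, wing):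
--   # Counting classification: tally cs_ ports and cs_gs_ ports, then decide
--   # arithmetically (all-wing / all-ground / mixed) instead of tracking a flag.
--   cs = sum(p.startswith('switches.cs_') for p in link)
--   gs = sum(p.startswith('switches.cs_gs_') for p in link)
--   if cs == 0:
--     is_wing = 'servo' in link[0] and 'servo' in link[1]
--   elif gs == 0:
--     is_wing = True
--   elif gs == cs:
--     is_wing = False
--   else:
--     return False
--   return is_wing if wing else not is_wing
-- ===== Notes on version B (the rewrite author's own statement) =====
-- stated objective: alternative
-- what changed: Replaces the stateful single pass (Optional first-seen flag, mid-loop early return) by a counting classification: tally the cs_ ports and the cs_gs_ ports and decide arithmetically (gs==0 all-wing, gs==cs all-ground, otherwise mixed => False), with the servo fallback when no cs_ port exists.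
import Mathlib
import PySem

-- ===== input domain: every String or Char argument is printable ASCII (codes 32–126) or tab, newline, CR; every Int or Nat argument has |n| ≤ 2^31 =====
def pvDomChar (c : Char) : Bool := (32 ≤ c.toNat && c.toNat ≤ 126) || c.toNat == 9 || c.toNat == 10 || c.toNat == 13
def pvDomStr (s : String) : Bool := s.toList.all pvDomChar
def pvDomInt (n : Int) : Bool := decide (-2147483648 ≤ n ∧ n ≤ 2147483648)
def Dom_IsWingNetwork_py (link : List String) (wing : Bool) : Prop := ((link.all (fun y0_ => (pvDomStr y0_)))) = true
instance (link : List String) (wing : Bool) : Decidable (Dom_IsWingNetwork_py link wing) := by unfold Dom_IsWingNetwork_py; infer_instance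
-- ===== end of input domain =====

-- B replaces A's stateful single pass (Optional accumulator, mid-loop early return) by a counting
-- classification: tally the cs_ and cs_gs_ ports and decide arithmetically. Objective: alternative.


-- ===== PORT A =====
-- A's loop over link: state is the Optional is_wing; result none = the mid-loop 'return False'.
def IsWingNetwork_loopA : List String → Option Bool → Option (Option Bool)
  | [], st => some st
  | p :: rest, st =>
    if PySem.Str.startswith p "switches.cs_" then
      match st with
      | none => IsWingNetwork_loopA rest (some (!(PySem.Str.startswith p "switches.cs_gs_")))
      | some w =>
        if w != !(PySem.Str.startswith p "switches.cs_gs_") then none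
        else IsWingNetwork_loopA rest (some w)
    else IsWingNetwork_loopA rest st

def IsWingNetwork_py (link : List String) (wing : Bool) : Bool :=
  match IsWingNetwork_loopA link none with
  | none => false                      -- the early 'return False'
  | some st =>
    let is_wing :=
      match st with
      | some w => w
      | none =>                        -- 'servo' in link[0] and 'servo' in link[1] (short-circuit; IndexError outside Pre_)
        match PySem.List.pyGet? link 0 with
        | none => false
        | some a =>
          if PySem.Str.isIn "servo" a then
            match PySem.List.pyGet? link 1 with
            | some b => PySem.Str.isIn "servo" b
            | none => false
          else false
    if wing then is_wing else !is_wing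

-- ===== PORT B =====
-- B: count the cs_ ports (cs) and the cs_gs_ ports (gs); classify by the two counts.
-- (python's sum over a generator of booleans is ported as List.countP)
def IsWingNetwork_py_alt (link : List String) (wing : Bool) : Bool :=
  let cs := link.countP (fun p => PySem.Str.startswith p "switches.cs_")
  let gs := link.countP (fun p => PySem.Str.startswith p "switches.cs_gs_")
  if cs = 0 then
    let is_wing :=                     -- 'servo' in link[0] and 'servo' in link[1] (short-circuit; IndexError outside Pre_)
      match PySem.List.pyGet? link 0 with
      | none => false
      | some a =>
        if PySem.Str.isIn "servo" a then
          match PySem.List.pyGet? link 1 with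
          | some b => PySem.Str.isIn "servo" b
          | none => false
        else false
    if wing then is_wing else !is_wing
  else if gs = 0 then (if wing then true else !true)
  else if gs = cs then (if wing then false else !false)
  else false

-- ===== PRECONDITION & SPEC =====
-- Pre_ excludes exactly the inputs where A raises IndexError: no cs_ port, and the list is empty or is a
-- singleton whose only entry contains 'servo' (so the short-circuited 'and' reads link[1]); B raises there too.
def Pre_IsWingNetwork_py (link : List String) (wing : Bool) : Prop :=
  link.any (fun p => PySem.Str.startswith p "switches.cs_") = true ∨ 2 ≤ link.length ∨
    (link.length = 1 ∧ PySem.Str.isIn "servo" (link.headD "") = false)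
instance (link : List String) (wing : Bool) : Decidable (Pre_IsWingNetwork_py link wing) := by
  unfold Pre_IsWingNetwork_py; infer_instance
def pvWitness_IsWingNetwork_py : List String × Bool := (["servo_a", "servo_b"], true)
def Spec_IsWingNetwork_py (link : List String) (wing : Bool) (out : Bool) : Prop := out = IsWingNetwork_py_alt link wing
instance (link : List String) (wing : Bool) (out : Bool) : Decidable (Spec_IsWingNetwork_py link wing out) := by unfold Spec_IsWingNetwork_py; infer_instance

-- ===== CLAIM (what is proved, stated in full; the proofs are below) =====
def Claim_equal_IsWingNetwork_py : Prop := ∀ (link : List String) (wing : Bool), Dom_IsWingNetwork_py link wing → Pre_IsWingNetwork_py link wing → Spec_IsWingNetwork_py link wing (IsWingNetwork_py link wing)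

-- ===== LEMMAS AND PROOFS =====
-- Proof-side view of A's loop: the list of wing-side flags of the cs_ ports.
def pvFlags (link : List String) : List Bool :=
  (link.filter (fun p => PySem.Str.startswith p "switches.cs_")).map
    (fun p => !(PySem.Str.startswith p "switches.cs_gs_"))

theorem pvFlags_cons (p : String) (rest : List String) :
    pvFlags (p :: rest) =
      if PySem.Str.startswith p "switches.cs_" then
        (!(PySem.Str.startswith p "switches.cs_gs_")) :: pvFlags rest
      else pvFlags rest := by
  unfold pvFlags; rw [List.filter_cons]; split <;> simp

theorem loopA_some (l : List String) (f : Bool) :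
    IsWingNetwork_loopA l (some f) =
      if (pvFlags l).all (fun g => g == f) then some (some f) else none := by
  induction l with
  | nil => simp [IsWingNetwork_loopA, pvFlags]
  | cons p rest ih =>
    have e : IsWingNetwork_loopA (p :: rest) (some f) =
        if PySem.Str.startswith p "switches.cs_" then
          (if f != !(PySem.Str.startswith p "switches.cs_gs_") then none
           else IsWingNetwork_loopA rest (some f))
        else IsWingNetwork_loopA rest (some f) := rfl
    rw [e, pvFlags_cons]
    cases hb : PySem.Str.startswith p "switches.cs_" with
    | false => simpa using ih
    | true =>
      simp only [if_true]
      cases hg : PySem.Str.startswith p "switches.cs_gs_" <;>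
        cases f <;> simp_all

theorem loopA_none (l : List String) :
    IsWingNetwork_loopA l none =
      match pvFlags l with
      | [] => some none
      | f :: fs => if fs.all (fun g => g == f) then some (some f) else none := by
  induction l with
  | nil => simp [IsWingNetwork_loopA, pvFlags]
  | cons p rest ih =>
    have e : IsWingNetwork_loopA (p :: rest) none =
        if PySem.Str.startswith p "switches.cs_" then
          IsWingNetwork_loopA rest (some (!(PySem.Str.startswith p "switches.cs_gs_")))
        else IsWingNetwork_loopA rest none := rfl
    rw [e, pvFlags_cons]
    cases hb : PySem.Str.startswith p "switches.cs_" with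
    | false => simpa using ih
    | true => simp only [if_true]; exact loopA_some rest _

-- 'switches.cs_gs_' starts with 'switches.cs_', so a cs_gs_ port is a cs_ port.
theorem gs_imp_cs (p : String) :
    PySem.Str.startswith p "switches.cs_gs_" = true →
    PySem.Str.startswith p "switches.cs_" = true := by
  simp only [PySem.Str.startswith_eq, PySem.Chars.startswith_iff]
  intro h
  exact List.IsPrefix.trans (by decide) h

theorem length_flags (l : List String) :
    (pvFlags l).length = l.countP (fun p => PySem.Str.startswith p "switches.cs_") := by
  simp only [pvFlags, List.length_map]
  exact List.countP_eq_length_filter.symm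

theorem count_false_flags (l : List String) :
    (pvFlags l).count false = l.countP (fun p => PySem.Str.startswith p "switches.cs_gs_") := by
  induction l with
  | nil => simp [pvFlags]
  | cons p rest ih =>
    rw [pvFlags_cons, List.countP_cons]
    cases hb : PySem.Str.startswith p "switches.cs_" with
    | false =>
      have hg : PySem.Str.startswith p "switches.cs_gs_" = false := by
        cases hgs : PySem.Str.startswith p "switches.cs_gs_" with
        | false => rfl
        | true => rw [gs_imp_cs p hgs] at hb; exact hb
      rw [hg, if_neg Bool.false_ne_true, if_neg Bool.false_ne_true, Nat.add_zero]
      exact ih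
    | true =>
      rw [if_pos rfl]
      cases hg : PySem.Str.startswith p "switches.cs_gs_" with
      | false =>
        rw [if_neg Bool.false_ne_true, Nat.add_zero, Bool.not_false]
        simpa [List.count_cons] using ih
      | true =>
        rw [if_pos rfl, Bool.not_true]
        simpa [List.count_cons] using ih

theorem loopA_none_nil (l : List String) (h : pvFlags l = []) :
    IsWingNetwork_loopA l none = some none := by
  rw [loopA_none, h]

theorem loopA_none_cons (l : List String) (f : Bool) (fs : List Bool) (h : pvFlags l = f :: fs) :
    IsWingNetwork_loopA l none =
      if fs.all (fun g => g == f) then some (some f) else none := by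
  rw [loopA_none, h]

-- ===== VERDICT (by name: the statement is the Claim_ definition above) =====
theorem IsWingNetwork_py_spec : Claim_equal_IsWingNetwork_py := by
  intro link wing _ _
  unfold Spec_IsWingNetwork_py IsWingNetwork_py IsWingNetwork_py_alt
  have hlen := length_flags link
  have hcnt := count_false_flags link
  cases hf : pvFlags link with
  | nil =>
    rw [loopA_none_nil link hf]
    rw [hf] at hlen
    simp only [List.length_nil] at hlen
    rw [if_pos (by omega)]
  | cons f fs =>
    rw [loopA_none_cons link f fs hf]
    rw [hf] at hlen hcnt
    simp only [List.length_cons] at hlen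
    cases hall : fs.all (fun g => g == f) with
    | true =>
      have hfs : ∀ g ∈ fs, g = f := by
        intro g hg
        have := List.all_eq_true.mp hall g hg
        simpa using this
      cases f with
      | true =>
        have h0 : (List.count false (true :: fs)) = 0 := by
          rw [List.count_eq_zero]
          intro hmem
          rcases List.mem_cons.mp hmem with h | h
          · exact Bool.false_ne_true h
          · exact Bool.false_ne_true (hfs false h)
        rw [h0] at hcnt
        have h1 : ¬ (List.countP (fun p => PySem.Str.startswith p "switches.cs_") link = 0) := by omega
        have h2 : List.countP (fun p => PySem.Str.startswith p "switches.cs_gs_") link = 0 := by omega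
        simp only [h1, h2, reduceIte]
      | false =>
        have hlenc : (List.count false (false :: fs)) = fs.length + 1 := by
          have hall' : ∀ g ∈ (false :: fs), false = g := by
            intro g hg
            rcases List.mem_cons.mp hg with h | h
            · exact h.symm
            · exact (hfs g h).symm
          simpa using (List.count_eq_length.mpr hall')
        rw [hlenc] at hcnt
        have h1 : ¬ (List.countP (fun p => PySem.Str.startswith p "switches.cs_") link = 0) := by omega
        have h2 : ¬ (List.countP (fun p => PySem.Str.startswith p "switches.cs_gs_") link = 0) := by omega
        have h3 : List.countP (fun p => PySem.Str.startswith p "switches.cs_gs_") link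
            = List.countP (fun p => PySem.Str.startswith p "switches.cs_") link := by omega
        simp only [h3, h1, reduceIte]
    | false =>
      -- mixed flags: some g in fs differs from f, so both true and false occur
      have ⟨g, hg, hgf⟩ : ∃ g ∈ fs, ¬ (g = f) := by
        by_contra hc
        simp only [not_exists, not_and] at hc
        have : fs.all (fun g => g == f) = true :=
          List.all_eq_true.mpr (fun g hg => by simpa using hc g hg)
        rw [hall] at this; exact Bool.false_ne_true this
      have hne : g = !f := by cases g <;> cases f <;> simp_all
      have hmem2 : (!f) ∈ f :: fs := List.mem_cons_of_mem _ (hne ▸ hg)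
      have hfmem : false ∈ f :: fs := by
        cases f with
        | false => exact List.mem_cons_self
        | true => simpa using hmem2
      have htmem : true ∈ f :: fs := by
        cases f with
        | true => exact List.mem_cons_self
        | false => simpa using hmem2
      have hpos : 0 < List.count false (f :: fs) := List.count_pos_iff.mpr hfmem
      have hlt : List.count false (f :: fs) < fs.length + 1 := by
        rcases Nat.lt_or_ge (List.count false (f :: fs)) (fs.length + 1) with h | h
        · exact h
        · exfalso
          have hle : List.count false (f :: fs) ≤ (f :: fs).length := List.count_le_length
          simp only [List.length_cons] at hle
          have heq : List.count false (f :: fs) = (f :: fs).length := by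
            simp only [List.length_cons]; omega
          have := List.count_eq_length.mp heq true htmem
          exact Bool.false_ne_true this
      have h1 : ¬ (List.countP (fun p => PySem.Str.startswith p "switches.cs_") link = 0) := by omega
      have h2 : ¬ (List.countP (fun p => PySem.Str.startswith p "switches.cs_gs_") link = 0) := by omega
      have h3 : ¬ (List.countP (fun p => PySem.Str.startswith p "switches.cs_gs_") link
            = List.countP (fun p => PySem.Str.startswith p "switches.cs_") link) := by omega
      simp only [h3, h1, h2, reduceIte]
      cases wing <;> rfl
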